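-- pv_equiv track=rewrite | github.com/Shifat11420/LeetcodeSolutions | p36-valid-sudoku.py | iterateM
-- ===== SOURCE A (Python) =====
-- def iterateM(mat):
--     matdict = {}
--     for i in range(len(mat)):
--         for j in range(len(mat[i])):
--             if mat[i][j] in matdict:
--                 matdict[mat[i][j]] += 1
--             else:
--                 matdict[mat[i][j]] = 1
--
--     for key in matdict:
--         if (not key == ".") and matdict[key] >1:
--            return False
--     return True
-- ===== SOURCE B (Python) =====
-- def iterateM(mat):
--     seen = set()
--     for row in mat:
--         for v in row:
--             if v != ".":
--                 if v in seen:
--                     return False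
--                 seen.add(v)
--     return True
-- ===== Notes on version B (the rewrite author's own statement) =====
-- stated objective: simpler
-- what changed: Replaced the two-phase count-then-scan approach (build an occurrence dict over all cells, then scan its keys for a non-'.' count > 1) with a single early-exiting pass over the cells that keeps a seen-set of non-'.' values and returns False the moment a value repeats.
import Mathlib
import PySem

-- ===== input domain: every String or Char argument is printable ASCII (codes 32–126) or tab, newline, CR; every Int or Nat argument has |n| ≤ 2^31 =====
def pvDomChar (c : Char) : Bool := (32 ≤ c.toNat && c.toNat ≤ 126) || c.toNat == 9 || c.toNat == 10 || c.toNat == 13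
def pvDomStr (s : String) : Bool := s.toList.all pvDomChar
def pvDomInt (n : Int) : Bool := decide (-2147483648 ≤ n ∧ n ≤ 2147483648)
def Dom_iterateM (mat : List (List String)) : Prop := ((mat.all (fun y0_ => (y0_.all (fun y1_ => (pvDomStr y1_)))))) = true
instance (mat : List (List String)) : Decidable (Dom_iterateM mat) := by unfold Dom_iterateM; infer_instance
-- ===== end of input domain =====

-- B replaces A's two-phase count-dict-then-key-scan with one early-exiting pass over the
-- cells keeping a seen-set of non-"." values (simpler; same asymptotic cost).


-- ===== PORT A =====
-- second loop 'for key in matdict: if (not key == ".") and matdict[key] > 1: return False'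
def pvCheckKeys (d : PySem.Dict String Int) : List String → Bool
  | [] => true
  | k :: ks => if (¬ (k = ".")) ∧ d.getD k 0 > 1 then false else pvCheckKeys d ks

def iterateM (mat : List (List String)) : Bool :=
  let matdict : PySem.Dict String Int :=
    (PySem.List.pyRange 0 (mat.length : Int) 1).foldl (fun d i =>
      let row := PySem.List.pyGetD mat i []
      (PySem.List.pyRange 0 (row.length : Int) 1).foldl (fun d j =>
        let v := PySem.List.pyGetD row j ""
        if d.contains v then d.modify v 0 (· + 1) else d.insert v 1) d)
      PySem.Dict.empty
  pvCheckKeys matdict matdict.keys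

-- ===== PORT B =====
-- inner 'for v in row' loop: none = early 'return False', some = updated seen-set
def pvScanRow (seen : PySem.Set String) : List String → Option (PySem.Set String)
  | [] => some seen
  | v :: vs =>
    if v ≠ "." then
      if seen.contains v then none
      else pvScanRow (seen.add v) vs
    else pvScanRow seen vs

def pvScanRows (seen : PySem.Set String) : List (List String) → Bool
  | [] => true
  | row :: rows =>
    match pvScanRow seen row with
    | none => false
    | some seen' => pvScanRows seen' rows

def iterateM_alt (mat : List (List String)) : Bool :=
  pvScanRows PySem.Set.empty mat

-- ===== PRECONDITION & SPEC =====
def Spec_iterateM (mat : List (List String)) (out : Bool) : Prop := out = iterateM_alt mat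
instance (mat : List (List String)) (out : Bool) : Decidable (Spec_iterateM mat out) := by unfold Spec_iterateM; infer_instance

-- ===== CLAIM (what is proved, stated in full; the proofs are below) =====
def Claim_equal_iterateM : Prop := ∀ (mat : List (List String)), Dom_iterateM mat → Spec_iterateM mat (iterateM mat)

-- ===== LEMMAS AND PROOFS =====

-- A's dict-building step is exactly the Counter step
theorem pvStep_eq_counter_step (d : PySem.Dict String Int) (v : String) :
    (if d.contains v then d.modify v 0 (· + 1) else d.insert v 1) = d.modify v 0 (· + 1) := by
  by_cases h : d.contains v = true
  · simp [h]
  · simp only [h, PySem.Dict.modify,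
      PySem.Dict.getD_of_not_contains d 0 (by simpa using h)]
    norm_num

-- A's dict is the Counter of the flattened matrix
theorem pvDict_eq_counter (mat : List (List String)) :
    ((PySem.List.pyRange 0 (mat.length : Int) 1).foldl (fun d i =>
      let row := PySem.List.pyGetD mat i []
      (PySem.List.pyRange 0 (row.length : Int) 1).foldl (fun d j =>
        let v := PySem.List.pyGetD row j ""
        if d.contains v then d.modify v 0 (· + 1) else d.insert v 1) d)
      PySem.Dict.empty) = PySem.Dict.counter mat.flatten := by
  simp only [pvStep_eq_counter_step]
  refine (PySem.List.foldl_pyRange_zero_pyGetD' mat ([] : List String)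
    (fun (d : PySem.Dict String Int) (row : List String) =>
      (PySem.List.pyRange 0 (row.length : Int) 1).foldl
        (fun d j => d.modify (PySem.List.pyGetD row j "") 0 (· + 1)) d)
    PySem.Dict.empty).trans ?_
  have hrow : (fun (d : PySem.Dict String Int) (row : List String) =>
      (PySem.List.pyRange 0 (row.length : Int) 1).foldl
        (fun d j => d.modify (PySem.List.pyGetD row j "") 0 (· + 1)) d)
      = fun d row => row.foldl (fun d v => d.modify v 0 (· + 1)) d := by
    funext d row
    exact PySem.List.foldl_pyRange_zero_pyGetD' row "" (fun d v => d.modify v 0 (· + 1)) d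
  rw [hrow, PySem.Dict.counter_eq_foldl, List.foldl_flatten]

-- A's key scan succeeds iff every listed key is "." or has count ≤ 1 in the dict
theorem pvCheckKeys_eq_true_iff (d : PySem.Dict String Int) (ks : List String) :
    pvCheckKeys d ks = true ↔ ∀ k ∈ ks, k = "." ∨ d.getD k 0 ≤ 1 := by
  induction ks with
  | nil => simp [pvCheckKeys]
  | cons k ks ih =>
    simp only [pvCheckKeys]
    split_ifs with h
    · simp only [false_iff]
      push Not
      exact ⟨k, by simp, h.1, by omega⟩
    · rw [ih]
      push Not at h
      constructor
      · intro hall x hx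
        rcases List.mem_cons.mp hx with rfl | hx
        · by_cases hk : x = "."
          · exact Or.inl hk
          · exact Or.inr (by have := h hk; omega)
        · exact hall x hx
      · intro hall x hx
        exact hall x (List.mem_cons_of_mem _ hx)

-- B's scan returns some iff the non-"." cells so far are distinct and unseen
theorem pvScanRow_isSome_iff (xs : List String) (seen : PySem.Set String) :
    (pvScanRow seen xs).isSome = true ↔
      (xs.filter (fun v => v ≠ ".")).Nodup ∧ ∀ v ∈ xs.filter (fun v => v ≠ "."), ¬ v ∈ seen := by
  induction xs generalizing seen with
  | nil => simp [pvScanRow]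
  | cons v vs ih =>
    simp only [pvScanRow]
    split_ifs with h h2
    · have hv : v ∈ seen := by simpa [PySem.Set.contains] using h2
      simp only [Option.isSome_none, Bool.false_eq_true, false_iff]
      intro ⟨_, hall⟩
      exact hall v (by simp [List.mem_filter, h]) hv
    · have hv : ¬ v ∈ seen := by simpa [PySem.Set.contains] using h2
      have hs : seen.add v = seen ++ [v] := by simp [PySem.Set.add, hv]
      rw [ih, hs]
      simp [h, List.nodup_cons, List.mem_filter]
      constructor
      · rintro ⟨hnd, hall⟩
        exact ⟨⟨fun hm => (hall v hm h).2 rfl, hnd⟩, hv, fun a ha hne => (hall a ha hne).1⟩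
      · rintro ⟨⟨hvm, hnd⟩, _, hall⟩
        exact ⟨hnd, fun a ha hne => ⟨hall a ha hne, fun he => hvm (he ▸ ha)⟩⟩
    · rw [ih]
      simp [h]

-- B's inner loop distributes over appending cell lists
theorem pvScanRow_append (seen : PySem.Set String) (xs ys : List String) :
    pvScanRow seen (xs ++ ys) = (pvScanRow seen xs).bind (fun s => pvScanRow s ys) := by
  induction xs generalizing seen with
  | nil => simp [pvScanRow]
  | cons v vs ih =>
    simp only [List.cons_append, pvScanRow]
    split_ifs with h h2
    · simp
    · exact ih _
    · exact ih _

-- B's row loop is its flat scan over the flattened matrix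
theorem pvScanRows_eq_scanRow_flatten (seen : PySem.Set String) (mat : List (List String)) :
    pvScanRows seen mat = ((pvScanRow seen mat.flatten).map (fun _ => true)).getD false := by
  induction mat generalizing seen with
  | nil => simp [pvScanRows, pvScanRow]
  | cons row rows ih =>
    simp only [pvScanRows, List.flatten_cons, pvScanRow_append]
    cases pvScanRow seen row with
    | none => simp
    | some s => simp [ih]

-- bridge: distinct non-"." cells ↔ every cell is "." or occurs at most once
theorem pvNodup_iff (xs : List String) :
    (xs.filter (fun v => v ≠ ".")).Nodup ↔ ∀ k ∈ xs, k = "." ∨ xs.count k ≤ 1 := by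
  rw [List.nodup_iff_count_le_one]
  constructor
  · intro h k hk
    by_cases hk2 : k = "."
    · exact Or.inl hk2
    · have := h k
      rw [List.count_filter (by simp [hk2])] at this
      exact Or.inr this
  · intro h a
    by_cases ha : a = "."
    · have h0 : List.count a (xs.filter (fun v => v ≠ ".")) = 0 :=
        List.count_eq_zero.mpr (by simp [ha])
      omega
    · rw [List.count_filter (by simp [ha])]
      by_cases hm : a ∈ xs
      · rcases h a hm with h1 | h1
        · exact absurd h1 ha
        · exact h1
      · simp [List.count_eq_zero.mpr hm]

-- ===== VERDICT (by name: the statement is the Claim_ definition above) =====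
theorem iterateM_spec : Claim_equal_iterateM := by
  intro mat _
  unfold Spec_iterateM
  simp only [iterateM, iterateM_alt]
  rw [pvDict_eq_counter, PySem.Dict.keys_counter,
    pvScanRows_eq_scanRow_flatten]
  rw [Bool.eq_iff_iff, pvCheckKeys_eq_true_iff]
  have hgetd : ∀ k, (PySem.Dict.counter mat.flatten).getD k 0 = (mat.flatten.count k : Int) :=
    fun k => PySem.Dict.getD_counter mat.flatten k
  cases hscan : pvScanRow PySem.Set.empty mat.flatten with
  | none =>
    have := pvScanRow_isSome_iff mat.flatten PySem.Set.empty
    rw [hscan] at this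
    simp only [Option.map_none, Option.getD_none, Bool.false_eq_true, iff_false]
    simp only [Option.isSome_none, Bool.false_eq_true, false_iff] at this
    intro hall
    apply this
    refine ⟨(pvNodup_iff mat.flatten).mpr ?_, by simp [PySem.Set.empty]⟩
    intro k hk
    rcases hall k ((PySem.Set.mem_ofList mat.flatten k).mpr hk) with h1 | h1
    · exact Or.inl h1
    · right
      rw [hgetd k] at h1
      exact_mod_cast h1
  | some s =>
    have := pvScanRow_isSome_iff mat.flatten PySem.Set.empty
    rw [hscan] at this
    simp only [Option.isSome_some, true_iff] at this
    simp only [Option.map_some, Option.getD_some, iff_true]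
    intro k hk
    rcases (pvNodup_iff mat.flatten).mp this.1 k
      ((PySem.Set.mem_ofList mat.flatten k).mp hk) with h1 | h1
    · exact Or.inl h1
    · right
      rw [hgetd k]
      exact_mod_cast h1
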